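-- pv_equiv track=rewrite | github.com/cyChen2003/Thumbnail-Extraction-System-based-on-VGG16-model | img.py | get_img_paths_by_cluster
-- ===== SOURCE A (Python) =====
-- def get_img_paths_by_cluster(labels, img_paths):
--     cluster_dict = {}
--     for label, img_path in zip(labels, img_paths):
--         if label not in cluster_dict:
--             cluster_dict[label] = [img_path]
--         else:
--             cluster_dict[label].append(img_path)
--     return cluster_dict
-- ===== SOURCE B (Python) =====
-- def get_img_paths_by_cluster(labels, img_paths):
--     pairs = list(zip(labels, img_paths))
--     keys = []
--     seen = set()
--     for label, _ in pairs:
--         if label not in seen: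
--             keys.append(label)
--             seen.add(label)
--     return {k: [p for l, p in pairs if l == k] for k in keys}
-- ===== Notes on version B (the rewrite author's own statement) =====
-- stated objective: alternative
-- what changed: Instead of accumulating per-label lists in one dict pass, B first collects the distinct labels in first-appearance order and then builds each group by filtering the zipped pairs per label.
import Mathlib
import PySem

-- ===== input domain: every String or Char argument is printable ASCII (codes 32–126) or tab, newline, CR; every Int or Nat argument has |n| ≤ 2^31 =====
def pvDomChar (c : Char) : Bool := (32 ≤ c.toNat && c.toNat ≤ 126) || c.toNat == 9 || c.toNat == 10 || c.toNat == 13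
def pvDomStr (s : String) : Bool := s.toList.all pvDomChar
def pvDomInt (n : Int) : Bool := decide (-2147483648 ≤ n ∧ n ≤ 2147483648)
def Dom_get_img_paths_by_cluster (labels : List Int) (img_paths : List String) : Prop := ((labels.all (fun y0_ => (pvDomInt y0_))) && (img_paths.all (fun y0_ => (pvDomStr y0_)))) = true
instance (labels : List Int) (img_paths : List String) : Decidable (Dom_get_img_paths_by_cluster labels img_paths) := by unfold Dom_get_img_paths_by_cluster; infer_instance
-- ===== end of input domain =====

-- B replaces A's single-pass dict accumulation by a distinct-labels pass followed by a
-- per-label filter of the zipped pairs (objective: alternative decomposition, same results).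

-- ===== PORT A =====
-- one dict pass: new label -> insert [path], seen label -> append path
def get_img_paths_by_cluster (labels : List Int) (img_paths : List String) : List (Int × List String) :=
  ((labels.zip img_paths).foldl
    (fun (d : PySem.Dict Int (List String)) (p : Int × String) =>
      if d.contains p.1 = false then d.insert p.1 [p.2]
      else d.modify p.1 [] (fun l => l ++ [p.2]))
    PySem.Dict.empty).items

-- ===== PORT B =====
-- pass 1: distinct labels in first-appearance order (keys list + seen set);
-- pass 2: dict comprehension, one filter of the pairs per distinct label
def get_img_paths_by_cluster_alt (labels : List Int) (img_paths : List String) : List (Int × List String) :=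
  let pairs := labels.zip img_paths
  let keys := (pairs.foldl
    (fun (acc : List Int × PySem.Set Int) (p : Int × String) =>
      if PySem.Set.contains acc.2 p.1 then acc
      else (acc.1 ++ [p.1], PySem.Set.add acc.2 p.1))
    ([], PySem.Set.empty)).1
  (keys.foldl
    (fun (d : PySem.Dict Int (List String)) (k : Int) =>
      d.insert k ((pairs.filter (fun q => q.1 == k)).map (fun q => q.2)))
    PySem.Dict.empty).items

-- ===== PRECONDITION & SPEC =====
def Spec_get_img_paths_by_cluster (labels : List Int) (img_paths : List String) (out : List (Int × List String)) : Prop := out = get_img_paths_by_cluster_alt labels img_paths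
instance (labels : List Int) (img_paths : List String) (out : List (Int × List String)) : Decidable (Spec_get_img_paths_by_cluster labels img_paths out) := by unfold Spec_get_img_paths_by_cluster; infer_instance

-- ===== CLAIM (what is proved, stated in full; the proofs are below) =====
def Claim_equal_get_img_paths_by_cluster : Prop := ∀ (labels : List Int) (img_paths : List String), Dom_get_img_paths_by_cluster labels img_paths → Spec_get_img_paths_by_cluster labels img_paths (get_img_paths_by_cluster labels img_paths)

-- ===== LEMMAS AND PROOFS =====

-- A's branching step is exactly a `modify` (insert on a fresh key = modify with default [])
theorem pv_stepA_eq_modify (d : PySem.Dict Int (List String)) (p : Int × String) :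
    (if d.contains p.1 = false then d.insert p.1 [p.2]
     else d.modify p.1 [] (fun l => l ++ [p.2]))
    = d.modify p.1 [] (fun l => l ++ [p.2]) := by
  by_cases h : d.contains p.1 = false
  · simp [h, PySem.Dict.modify, PySem.Dict.getD_of_not_contains _ _ h]
  · simp [h]

-- B's first pass keeps keys list = seen set, and both follow `Set.add`
theorem pv_keysFold (ps : List (Int × String)) (s : List Int) :
    ps.foldl
      (fun (acc : List Int × PySem.Set Int) (p : Int × String) =>
        if PySem.Set.contains acc.2 p.1 then acc
        else (acc.1 ++ [p.1], PySem.Set.add acc.2 p.1))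
      (s, s)
    = ((ps.map (fun p => p.1)).foldl PySem.Set.add s,
       (ps.map (fun p => p.1)).foldl PySem.Set.add s) := by
  induction ps generalizing s with
  | nil => rfl
  | cons p ps ih =>
    simp only [List.foldl_cons, List.map_cons]
    by_cases h : PySem.Set.contains s p.1 = true
    · rw [if_pos h, show PySem.Set.add s p.1 = s from by unfold PySem.Set.add; rw [if_pos h]]
      exact ih s
    · rw [if_neg h, show PySem.Set.add s p.1 = s ++ [p.1] from by unfold PySem.Set.add; rw [if_neg h]]
      exact ih (s ++ [p.1])

theorem get_img_paths_by_cluster_eq_alt (labels : List Int) (img_paths : List String) :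
    get_img_paths_by_cluster labels img_paths = get_img_paths_by_cluster_alt labels img_paths := by
  show _ = get_img_paths_by_cluster_alt labels img_paths
  unfold get_img_paths_by_cluster
  simp only [get_img_paths_by_cluster_alt]
  set pairs := labels.zip img_paths with hpairs
  set ks : List Int := PySem.Set.ofList (pairs.map (fun p => p.1)) with hks
  have hnd : ks.Nodup := PySem.Set.nodup_ofList _
  -- A's dict is the pure `modify` fold
  have hfold : pairs.foldl
      (fun (d : PySem.Dict Int (List String)) (p : Int × String) =>
        if d.contains p.1 = false then d.insert p.1 [p.2]
        else d.modify p.1 [] (fun l => l ++ [p.2]))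
      PySem.Dict.empty
      = pairs.foldl
      (fun (d : PySem.Dict Int (List String)) (p : Int × String) =>
        d.modify p.1 [] (fun l => l ++ [p.2]))
      PySem.Dict.empty := by
    have : (fun (d : PySem.Dict Int (List String)) (p : Int × String) =>
        if d.contains p.1 = false then d.insert p.1 [p.2]
        else d.modify p.1 [] (fun l => l ++ [p.2]))
        = (fun (d : PySem.Dict Int (List String)) (p : Int × String) =>
        d.modify p.1 [] (fun l => l ++ [p.2])) :=
      funext fun d => funext fun p => pv_stepA_eq_modify d p
    rw [this]
  rw [hfold]
  set D : PySem.Dict Int (List String) := pairs.foldl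
      (fun d p => d.modify p.1 [] (fun l => l ++ [p.2])) PySem.Dict.empty with hD
  -- A's keys are the distinct labels in first-appearance order
  have hkeys : D.keys = ks := by
    rw [hD, PySem.Dict.keys_foldl_modify_key pairs (fun p => p.1) []
      (fun _ p l => l ++ [p.2]) PySem.Dict.empty]
    simp [hks, PySem.Set.update_nil_left]
  -- A's items as a map over its keys, values via the grouping lemma
  have hitems : D.items = ks.map (fun k => (k, (pairs.filter (fun q => q.1 == k)).map (fun q => q.2))) := by
    rw [PySem.Dict.items_eq_map_keys D (hkeys ▸ hnd) [], hkeys]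
    refine List.map_congr_left (fun k _ => ?_)
    rw [hD, PySem.Dict.getD_foldl_modify_append]
    simp
  -- B's first pass computes the same key list
  have hkeysB : (pairs.foldl
      (fun (acc : List Int × PySem.Set Int) (p : Int × String) =>
        if PySem.Set.contains acc.2 p.1 then acc
        else (acc.1 ++ [p.1], PySem.Set.add acc.2 p.1))
      ([], PySem.Set.empty)).1 = ks := by
    have := pv_keysFold pairs []
    rw [show (([] : List Int), (PySem.Set.empty : PySem.Set Int)) = (([] : List Int), ([] : List Int)) from rfl, this]
    simp [hks, PySem.Set.ofList_eq_foldl]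
  rw [hkeysB]
  -- B's second pass over distinct fresh keys appends its entries
  have hfresh := PySem.Dict.items_foldl_insert_fresh ks (fun k => k)
      (fun k => (pairs.filter (fun q => q.1 == k)).map (fun q => q.2))
      (PySem.Dict.empty : PySem.Dict Int (List String))
      (fun a _ => PySem.Dict.contains_empty a) (by simpa using hnd)
  rw [hfresh, hitems]
  rfl

-- ===== VERDICT (by name: the statement is the Claim_ definition above) =====
theorem get_img_paths_by_cluster_spec : Claim_equal_get_img_paths_by_cluster := by
  intro labels img_paths _
  unfold Spec_get_img_paths_by_cluster
  exact get_img_paths_by_cluster_eq_alt labels img_paths
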